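-- pv_equiv track=rewrite | github.com/AdithyaRajagopalan24/LeetcodeAnswers | 3350-adjacent-increasing-subarrays-detection-ii/3350-adjacent-increasing-subarrays-detection-ii.py | maxIncreasingSubarrays
-- ===== SOURCE A (Python) =====
-- def maxIncreasingSubarrays(nums):
--     n = len(nums)
--     if n <= 1:
--         return n
--
--     incEnd = [1] * n
--     incStart = [1] * n
--
--     for i in range(1, n):
--         if nums[i] > nums[i - 1]:
--             incEnd[i] = incEnd[i - 1] + 1
--
--     for i in range(n - 2, -1, -1):
--         if nums[i] < nums[i + 1]:
--             incStart[i] = incStart[i + 1] + 1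
--
--     res = 1
--     for k in range(n - 1):
--         res = max(res, min(incEnd[k], incStart[k + 1]))
--
--     return res
-- ===== SOURCE B (Python) =====
-- def maxIncreasingSubarrays(nums):
--     n = len(nums)
--     if n <= 1:
--         return n
--     ans, prev, cur = 0, 0, 1
--     for x, y in zip(nums, nums[1:]):
--         if y > x:
--             cur += 1
--         else:
--             prev, cur = cur, 1
--         ans = max(ans, cur // 2, min(prev, cur))
--     return ans
-- ===== Notes on version B (the rewrite author's own statement) =====
-- stated objective: alternative
-- what changed: Replaces A's two prefix/suffix run-length tables plus a min-scan over all split points by a single left-to-right pass over adjacent pairs that keeps only the current and previous increasing-run lengths, updating the answer with cur//2 and min(prev,cur) at each step.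
import Mathlib
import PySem

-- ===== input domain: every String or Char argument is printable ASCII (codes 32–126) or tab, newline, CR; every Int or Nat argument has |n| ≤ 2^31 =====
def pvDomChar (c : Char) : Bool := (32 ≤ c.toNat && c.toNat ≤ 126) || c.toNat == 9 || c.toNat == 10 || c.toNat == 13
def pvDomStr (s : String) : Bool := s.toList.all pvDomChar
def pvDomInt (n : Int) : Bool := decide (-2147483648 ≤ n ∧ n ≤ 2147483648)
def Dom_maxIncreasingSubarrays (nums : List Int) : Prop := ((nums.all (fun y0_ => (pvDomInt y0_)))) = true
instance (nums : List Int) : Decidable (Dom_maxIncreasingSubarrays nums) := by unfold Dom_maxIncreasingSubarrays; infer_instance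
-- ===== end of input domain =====

-- B replaces the two run-length tables and min-scan of A by a one-pass scan keeping only the
-- current and previous increasing-run lengths (same value, O(1) extra space; objective: alternative).

-- ===== PORT A =====
-- `for i in range(start, start+count)` ascending index loop
def pvUp {α : Type} (f : Nat → α → α) : Nat → Nat → α → α
  | _, 0, acc => acc
  | i, Nat.succ c, acc => pvUp f (i+1) c (f i acc)

-- `for i in range(start, start-count, -1)` descending index loop
def pvDown {α : Type} (f : Nat → α → α) : Nat → Nat → α → α
  | _, 0, acc => acc
  | i, Nat.succ c, acc => pvDown f (i-1) c (f i acc)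

def maxIncreasingSubarrays (nums : List Int) : Int :=
  let n := nums.length
  if n ≤ 1 then (n : Int)
  else
    let incEnd0 := List.replicate n (1 : Int)
    let incStart0 := List.replicate n (1 : Int)
    let incEnd := pvUp (fun i acc =>
      if nums.getD i 0 > nums.getD (i-1) 0 then acc.set i (acc.getD (i-1) 0 + 1) else acc)
      1 (n-1) incEnd0
    let incStart := pvDown (fun i acc =>
      if nums.getD i 0 < nums.getD (i+1) 0 then acc.set i (acc.getD (i+1) 0 + 1) else acc)
      (n-2) (n-1) incStart0
    pvUp (fun k res => max res (min (incEnd.getD k 0) (incStart.getD (k+1) 0))) 0 (n-1) 1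

-- ===== PORT B =====
-- the `for x, y in zip(nums, nums[1:])` loop of Source B, state (prev, cur, ans)
def altGo : Int → List Int → Int → Int → Int → Int
  | _, [], _, _, ans => ans
  | x, y :: t, prev, cur, ans =>
    let pc := if y > x then (prev, cur + 1) else (cur, 1)
    altGo y t pc.1 pc.2 (max (max ans (PySem.Int.floordiv pc.2 2)) (min pc.1 pc.2))

def maxIncreasingSubarrays_alt (nums : List Int) : Int :=
  if nums.length ≤ 1 then (nums.length : Int)
  else
    match nums with
    | [] => 0
    | x :: t => altGo x t 0 1 0

-- ===== PRECONDITION & SPEC =====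
def Spec_maxIncreasingSubarrays (nums : List Int) (out : Int) : Prop := out = maxIncreasingSubarrays_alt nums
instance (nums : List Int) (out : Int) : Decidable (Spec_maxIncreasingSubarrays nums out) := by unfold Spec_maxIncreasingSubarrays; infer_instance

-- ===== CLAIM (what is proved, stated in full; the proofs are below) =====
def Claim_equal_maxIncreasingSubarrays : Prop := ∀ (nums : List Int), Dom_maxIncreasingSubarrays nums → Spec_maxIncreasingSubarrays nums (maxIncreasingSubarrays nums)

-- ===== LEMMAS AND PROOFS =====

-- length of the maximal strictly increasing run of nums ending at index i
def eN (nums : List Int) : Nat → Nat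
  | 0 => 1
  | i+1 => if nums.getD i 0 < nums.getD (i+1) 0 then eN nums i + 1 else 1

-- length of the maximal strictly increasing run immediately before the one containing i (0 if none)
def pN (nums : List Int) : Nat → Nat
  | 0 => 0
  | i+1 => if nums.getD i 0 < nums.getD (i+1) 0 then pN nums i else eN nums i

-- length of the maximal strictly increasing run of nums starting at index i
def sN (nums : List Int) (i : Nat) : Nat :=
  if h : i + 1 < nums.length ∧ nums.getD i 0 < nums.getD (i+1) 0 then sN nums (i+1) + 1 else 1
  termination_by nums.length - i
  decreasing_by omega

def termA (nums : List Int) (k : Nat) : Nat := min (eN nums k) (sN nums (k+1))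
def termB (nums : List Int) (j : Nat) : Nat := max (eN nums j / 2) (min (pN nums j) (eN nums j))


-- ---- generic fold/max helpers (Nat and Int) ----
lemma le_foldl_max_base (l : List Nat) (b : Nat) : b ≤ l.foldl max b := by
  induction l generalizing b with
  | nil => simp
  | cons x t ih => exact le_trans (le_max_left b x) (ih (max b x))

lemma le_foldl_max_mem {x : Nat} (l : List Nat) (b : Nat) (h : x ∈ l) : x ≤ l.foldl max b := by
  induction l generalizing b with
  | nil => simp at h
  | cons y t ih =>
    rcases List.mem_cons.mp h with rfl | h'
    · exact le_trans (le_max_right b x) (le_foldl_max_base t (max b x))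
    · exact ih (max b y) h'

lemma foldl_max_le {M : Nat} (l : List Nat) (b : Nat) (hb : b ≤ M) (h : ∀ x ∈ l, x ≤ M) :
    l.foldl max b ≤ M := by
  induction l generalizing b with
  | nil => simpa using hb
  | cons y t ih =>
    exact ih (max b y) (max_le hb (h y (List.mem_cons_self))) (fun x hx => h x (List.mem_cons_of_mem _ hx))

lemma foldl_max_cast (l : List Nat) (b : Nat) :
    (l.map (fun x : Nat => (x : Int))).foldl max (b : Int) = ((l.foldl max b : Nat) : Int) := by
  induction l generalizing b with
  | nil => rfl
  | cons y t ih =>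
    rw [List.map_cons, List.foldl_cons, List.foldl_cons, ← Nat.cast_max, ih]

lemma pvUp_eq_foldl {α : Type} (g : Nat → α → α) :
    ∀ (c i : Nat) (r : α), pvUp g i c r = (List.range' i c).foldl (fun r j => g j r) r := by
  intro c
  induction c with
  | zero => intro i r; simp [pvUp]
  | succ c ih => intro i r; rw [List.range'_succ]; simp [pvUp, ih]

lemma foldl_max_map (f : Nat → Int) (l : List Nat) (b : Int) :
    l.foldl (fun r k => max r (f k)) b = (l.map f).foldl max b := by
  induction l generalizing b with
  | nil => rfl
  | cons y t ih => simp [List.foldl_cons, ih]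

-- ---- getD/set helpers ----
lemma getD_set_self (l : List Int) (i : Nat) (h : i < l.length) (v : Int) :
    (l.set i v).getD i 0 = v := by
  simp [List.getD_eq_getElem?_getD, h]

lemma getD_set_ne (l : List Int) {i m : Nat} (h : m ≠ i) (v : Int) :
    (l.set i v).getD m 0 = l.getD m 0 := by
  simp [List.getD_eq_getElem?_getD, List.getElem?_set_ne (Ne.symm h)]

-- ---- basic facts about eN, sN, pN ----
lemma eN_succ (nums : List Int) (i : Nat) :
    eN nums (i+1) = if nums.getD i 0 < nums.getD (i+1) 0 then eN nums i + 1 else 1 := rfl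

lemma pN_succ (nums : List Int) (i : Nat) :
    pN nums (i+1) = if nums.getD i 0 < nums.getD (i+1) 0 then pN nums i else eN nums i := rfl

lemma e_pos (nums : List Int) (i : Nat) : 1 ≤ eN nums i := by
  cases i with
  | zero => simp [eN]
  | succ j => rw [eN_succ]; split <;> omega

lemma e_two (nums : List Int) (i : Nat) (h : 2 ≤ eN nums i) :
    1 ≤ i ∧ nums.getD (i-1) 0 < nums.getD i 0 ∧ eN nums (i-1) = eN nums i - 1 := by
  cases i with
  | zero => simp [eN] at h
  | succ j =>
    simp only [Nat.add_sub_cancel]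
    rw [eN_succ] at h
    by_cases hc : nums.getD j 0 < nums.getD (j+1) 0
    · refine ⟨by omega, hc, ?_⟩
      rw [eN_succ, if_pos hc]
      omega
    · rw [if_neg hc] at h
      exact absurd h (by omega)

lemma run_e (nums : List Int) : ∀ (j i : Nat), j < eN nums i → eN nums (i - j) = eN nums i - j := by
  intro j
  induction j with
  | zero => intro i _; simp
  | succ j ih =>
    intro i hj
    have h2 : 2 ≤ eN nums i := by omega
    obtain ⟨hi1, _, he⟩ := e_two nums i h2
    have h3 : eN nums (i - 1 - j) = eN nums (i-1) - j := ih (i-1) (by omega)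
    have hidx : i - (j+1) = i - 1 - j := by omega
    rw [hidx, h3, he]
    omega

lemma run_incr (nums : List Int) (j i : Nat) (h : j + 1 < eN nums i) :
    nums.getD (i - j - 1) 0 < nums.getD (i - j) 0 := by
  have h1 : eN nums (i - j) = eN nums i - j := run_e nums j i (by omega)
  have h2 : 2 ≤ eN nums (i - j) := by omega
  obtain ⟨_, hlt, _⟩ := e_two nums (i - j) h2
  simpa using hlt

lemma e_le (nums : List Int) : ∀ i : Nat, eN nums i ≤ i + 1 := by
  intro i
  induction i with
  | zero => simp [eN]
  | succ j ih => rw [eN_succ]; split <;> omega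

lemma e_chain (nums : List Int) :
    ∀ (m k : Nat), (∀ j < m, nums.getD (k+j) 0 < nums.getD (k+j+1) 0) →
    eN nums (k+m) = eN nums k + m := by
  intro m
  induction m with
  | zero => intro k _; simp
  | succ m ih =>
    intro k hch
    have hc : nums.getD (k+m) 0 < nums.getD (k+m+1) 0 := hch m (by omega)
    have h1 : eN nums (k+m+1) = eN nums (k+m) + 1 := by rw [eN_succ, if_pos hc]
    rw [show k + (m+1) = k + m + 1 by omega, h1, ih k (fun j hj => hch j (by omega))]
    omega

lemma sN_eq (nums : List Int) (i : Nat) :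
    sN nums i = if i + 1 < nums.length ∧ nums.getD i 0 < nums.getD (i+1) 0 then sN nums (i+1) + 1 else 1 := by
  rw [sN]; simp

lemma s_pos (nums : List Int) (i : Nat) : 1 ≤ sN nums i := by
  rw [sN_eq]; split <;> omega

lemma s_le (nums : List Int) : ∀ (c i : Nat), nums.length - i ≤ c → i < nums.length →
    sN nums i ≤ nums.length - i := by
  intro c
  induction c with
  | zero => intro i h hi; omega
  | succ c ih =>
    intro i h hi
    rw [sN_eq]
    split
    · next hc => have := ih (i+1) (by omega) hc.1; omega
    · omega

lemma s_two (nums : List Int) (i : Nat) (h : 2 ≤ sN nums i) :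
    i + 1 < nums.length ∧ nums.getD i 0 < nums.getD (i+1) 0 ∧ sN nums (i+1) = sN nums i - 1 := by
  rw [sN_eq] at h
  split at h
  · next hc =>
    refine ⟨hc.1, hc.2, ?_⟩
    rw [sN_eq nums i, if_pos hc]
    omega
  · exact absurd h (by omega)

lemma s_steps (nums : List Int) :
    ∀ (q i : Nat), q + 1 < sN nums i →
    nums.getD (i+q) 0 < nums.getD (i+q+1) 0 ∧ i + q + 1 < nums.length := by
  intro q
  induction q with
  | zero =>
    intro i h
    obtain ⟨h1, h2, _⟩ := s_two nums i (by omega)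
    exact ⟨by simpa using h2, by simpa using h1⟩
  | succ q ih =>
    intro i h
    obtain ⟨h1, h2, h3⟩ := s_two nums i (by omega)
    have H := ih (i+1) (by omega)
    refine ⟨?_, by have := H.2; omega⟩
    have hx := H.1
    rw [show i+1+q = i+(q+1) from by omega] at hx
    exact hx

lemma s_ge (nums : List Int) :
    ∀ (m i : Nat), i + m < nums.length → (∀ j < m, nums.getD (i+j) 0 < nums.getD (i+j+1) 0) →
    m + 1 ≤ sN nums i := by
  intro m
  induction m with
  | zero => intro i _ _; exact s_pos nums i
  | succ m ih =>
    intro i hlen hch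
    rw [sN_eq]
    have hc : nums.getD i 0 < nums.getD (i+1) 0 := by simpa using hch 0 (by omega)
    have h1 : i + 1 < nums.length := by omega
    rw [if_pos ⟨h1, hc⟩]
    have := ih (i+1) (by omega) (fun j hj => by
      have hy := hch (j+1) (by omega)
      rw [show i+(j+1) = i+1+j from by omega] at hy
      rw [show i+1+j+1 = i+(j+1)+1 from by omega] at hy
      rw [show i+1+j+1 = i+(j+1)+1 from by omega]
      exact hy)
    omega

lemma p_char (nums : List Int) : ∀ i : Nat,
    (pN nums i = 0 ∧ eN nums i = i + 1) ∨
    (eN nums i ≤ i ∧ ¬(nums.getD (i - eN nums i) 0 < nums.getD (i - eN nums i + 1) 0) ∧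
      pN nums i = eN nums (i - eN nums i)) := by
  intro i
  induction i with
  | zero => left; simp [pN, eN]
  | succ j ih =>
    by_cases hc : nums.getD j 0 < nums.getD (j+1) 0
    · have he : eN nums (j+1) = eN nums j + 1 := by rw [eN_succ, if_pos hc]
      have hp : pN nums (j+1) = pN nums j := by rw [pN_succ, if_pos hc]
      rcases ih with ⟨h1, h2⟩ | ⟨h1, h2, h3⟩
      · left
        constructor
        · rw [hp, h1]
        · rw [he, h2]
      · right
        refine ⟨by omega, ?_, ?_⟩
        · rw [show j + 1 - eN nums (j+1) = j - eN nums j from by omega]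
          exact h2
        · rw [show j + 1 - eN nums (j+1) = j - eN nums j from by omega, hp]
          exact h3
    · have he : eN nums (j+1) = 1 := by rw [eN_succ, if_neg hc]
      have hp : pN nums (j+1) = eN nums j := by rw [pN_succ, if_neg hc]
      right
      refine ⟨by omega, ?_, ?_⟩
      · rw [he]
        simpa using hc
      · rw [he, hp]
        simp

-- ---- port A equals the reference max over split points ----
lemma eN_shift (nums : List Int) (i : Nat) (hi : 1 ≤ i) :
    eN nums i = if nums.getD (i-1) 0 < nums.getD i 0 then eN nums (i-1) + 1 else 1 := by
  obtain ⟨j, rfl⟩ : ∃ j, i = j + 1 := ⟨i - 1, by omega⟩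
  simp only [Nat.add_sub_cancel]
  exact eN_succ nums j

lemma incEnd_inv (nums : List Int) :
    ∀ (c i : Nat) (acc : List Int), acc.length = nums.length → 1 ≤ i → i + c = nums.length →
    (∀ m, m < nums.length → acc.getD m 0 = if m < i then (eN nums m : Int) else 1) →
    ∀ m, m < nums.length →
      (pvUp (fun i acc =>
        if nums.getD i 0 > nums.getD (i-1) 0 then acc.set i (acc.getD (i-1) 0 + 1) else acc)
        i c acc).getD m 0 = (eN nums m : Int) := by
  intro c
  induction c with
  | zero =>
    intro i acc hlen hi hic hinv m hm
    have := hinv m hm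
    simp only [pvUp]
    rw [this, if_pos (by omega)]
  | succ c ih =>
    intro i acc hlen hi hic hinv m hm
    simp only [pvUp]
    set acc' := if nums.getD i 0 > nums.getD (i-1) 0 then acc.set i (acc.getD (i-1) 0 + 1) else acc with hacc'
    have hlen' : acc'.length = nums.length := by
      rw [hacc']; split <;> simp [hlen]
    refine ih (i+1) acc' hlen' (by omega) (by omega) (fun m' hm' => ?_) m hm
    have hiacc : i < acc.length := by omega
    by_cases hmi : m' = i
    · subst hmi
      rw [hacc']
      rw [eN_shift nums m' (by omega)]
      split
      · next hc =>
        rw [if_pos (by omega), getD_set_self acc m' hiacc, hinv (m'-1) (by omega), if_pos (by omega)]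
        push_cast; ring
      · next hc =>
        rw [if_pos (by omega), hinv m' hm', if_neg (by omega)]
        simp
    · have : acc'.getD m' 0 = acc.getD m' 0 := by
        rw [hacc']; split
        · exact getD_set_ne acc hmi _
        · rfl
      rw [this, hinv m' hm']
      by_cases h2 : m' < i
      · rw [if_pos h2, if_pos (by omega)]
      · rw [if_neg h2, if_neg (by omega)]

lemma incStart_inv (nums : List Int) :
    ∀ (c : Nat), c ≤ nums.length - 1 → ∀ (acc : List Int), acc.length = nums.length →
    (∀ m, m < nums.length → acc.getD m 0 = if c ≤ m then (sN nums m : Int) else 1) →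
    ∀ m, m < nums.length →
      (pvDown (fun i acc =>
        if nums.getD i 0 < nums.getD (i+1) 0 then acc.set i (acc.getD (i+1) 0 + 1) else acc)
        (c-1) c acc).getD m 0 = (sN nums m : Int) := by
  intro c
  induction c with
  | zero =>
    intro _ acc hlen hinv m hm
    simp only [pvDown]
    rw [hinv m hm, if_pos (by omega)]
  | succ c ih =>
    intro hc acc hlen hinv m hm
    simp only [pvDown, Nat.succ_sub_one]
    set acc' := if nums.getD c 0 < nums.getD (c+1) 0 then acc.set c (acc.getD (c+1) 0 + 1) else acc with hacc'
    have hlen' : acc'.length = nums.length := by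
      rw [hacc']; split <;> simp [hlen]
    refine ih (by omega) acc' hlen' (fun m' hm' => ?_) m hm
    have hcacc : c < acc.length := by omega
    by_cases hmc : m' = c
    · subst hmc
      rw [if_pos (le_refl m'), hacc']
      have hm1 : m' + 1 < nums.length := by omega
      by_cases hlt : nums.getD m' 0 < nums.getD (m'+1) 0
      · rw [if_pos hlt, getD_set_self acc m' hcacc, hinv (m'+1) hm1, if_pos (by omega),
          sN_eq nums m', if_pos ⟨hm1, hlt⟩]
        push_cast
        ring
      · rw [if_neg hlt, hinv m' hm', if_neg (by omega), sN_eq nums m',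
          if_neg (fun h => hlt h.2)]
        simp
    · have : acc'.getD m' 0 = acc.getD m' 0 := by
        rw [hacc']; split
        · exact getD_set_ne acc hmc _
        · rfl
      rw [this, hinv m' hm']
      by_cases h2 : c ≤ m'
      · rw [if_pos h2, if_pos (by omega)]
      · rw [if_neg h2, if_neg (by omega)]

lemma foldl_congr_mem2 {l : List Nat} {f g : Int → Nat → Int} (b : Int)
    (h : ∀ x ∈ l, ∀ r, f r x = g r x) : l.foldl f b = l.foldl g b := by
  induction l generalizing b with
  | nil => rfl
  | cons y t ih =>
    rw [List.foldl_cons, List.foldl_cons, h y List.mem_cons_self]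
    exact ih _ (fun x hx r => h x (List.mem_cons_of_mem _ hx) r)

lemma portA_eq (nums : List Int) (hn : 2 ≤ nums.length) :
    maxIncreasingSubarrays nums =
      (((List.range' 0 (nums.length - 1)).map (termA nums)).foldl max 1 : Nat) := by
  simp only [maxIncreasingSubarrays]
  rw [if_neg (by omega)]
  have hinitE : ∀ m, m < nums.length →
      (List.replicate nums.length (1:Int)).getD m 0 = if m < 1 then ((eN nums m : Nat) : Int) else 1 := by
    intro m hm
    have hrep : (List.replicate nums.length (1:Int)).getD m 0 = 1 := by
      simp [List.getD_eq_getElem?_getD, hm]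
    rw [hrep]
    by_cases h1 : m < 1
    · have : m = 0 := by omega
      subst this
      simp [eN]
    · rw [if_neg h1]
  have hE := incEnd_inv nums (nums.length - 1) 1 (List.replicate nums.length 1)
    (by simp) (le_refl 1) (by omega) hinitE
  have hinitS : ∀ m, m < nums.length →
      (List.replicate nums.length (1:Int)).getD m 0 = if nums.length - 1 ≤ m then ((sN nums m : Nat) : Int) else 1 := by
    intro m hm
    have hrep : (List.replicate nums.length (1:Int)).getD m 0 = 1 := by
      simp [List.getD_eq_getElem?_getD, hm]
    rw [hrep]
    by_cases h1 : nums.length - 1 ≤ m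
    · have hm' : m = nums.length - 1 := by omega
      subst hm'
      rw [if_pos h1, sN_eq, if_neg (by omega)]
      simp
    · rw [if_neg h1]
  have hS := incStart_inv nums (nums.length - 1) (by omega) (List.replicate nums.length 1)
    (by simp) hinitS
  rw [pvUp_eq_foldl]
  simp only [show nums.length - 1 - 1 = nums.length - 2 from by omega] at hS
  rw [foldl_congr_mem2 (g := fun r k => max r ((termA nums k : Nat) : Int)) 1 ?_]
  · rw [foldl_max_map, ← foldl_max_cast, List.map_map]
    rfl
  · intro k hk r
    have hk' := List.mem_range'_1.mp hk
    have hkn : k < nums.length - 1 := by omega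
    rw [hE k (by omega), hS (k+1) (by omega)]
    unfold termA
    push_cast
    rfl

-- ---- port B equals the one-pass reference ----
lemma altGo_inv (nums : List Int) :
    ∀ (c i : Nat) (ans : Int), i + 1 + c = nums.length →
    altGo (nums.getD i 0) (List.drop (i+1) nums) ((pN nums i : Nat) : Int) ((eN nums i : Nat) : Int) ans
      = ((List.range' (i+1) c).map (fun j => ((termB nums j : Nat) : Int))).foldl max ans := by
  intro c
  induction c with
  | zero =>
    intro i ans hlen
    rw [List.drop_eq_nil_of_le (by omega)]
    simp [altGo]
  | succ c ih =>
    intro i ans hlen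
    have hi1 : i + 1 < nums.length := by omega
    have hdrop : List.drop (i+1) nums = nums.getD (i+1) 0 :: List.drop (i+2) nums := by
      rw [List.drop_eq_getElem_cons hi1, List.getD_eq_getElem nums 0 hi1]
    rw [hdrop]
    simp only [altGo]
    have hpc : (if nums.getD (i+1) 0 > nums.getD i 0
          then (((pN nums i : Nat) : Int), ((eN nums i : Nat) : Int) + 1)
          else (((eN nums i : Nat) : Int), 1))
        = (((pN nums (i+1) : Nat) : Int), ((eN nums (i+1) : Nat) : Int)) := by
      by_cases hc : nums.getD i 0 < nums.getD (i+1) 0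
      · rw [if_pos (show nums.getD (i+1) 0 > nums.getD i 0 from hc),
          eN_succ, pN_succ, if_pos hc, if_pos hc]
        push_cast
        rfl
      · rw [if_neg (show ¬ nums.getD (i+1) 0 > nums.getD i 0 from hc),
          eN_succ, pN_succ, if_neg hc, if_neg hc]
        simp
    rw [hpc]
    have hdiv : PySem.Int.floordiv ((eN nums (i+1) : Nat) : Int) 2 = ((eN nums (i+1) / 2 : Nat) : Int) := by
      exact_mod_cast PySem.Int.floordiv_natCast (eN nums (i+1)) 2
    have hterm : max (max ans (PySem.Int.floordiv ((eN nums (i+1) : Nat) : Int) 2))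
          (min ((pN nums (i+1) : Nat) : Int) ((eN nums (i+1) : Nat) : Int))
        = max ans ((termB nums (i+1) : Nat) : Int) := by
      rw [hdiv, max_assoc]
      unfold termB
      push_cast
      rfl
    rw [hterm]
    rw [ih (i+1) _ (by omega)]
    rw [List.range'_succ]
    simp

lemma portB_eq (nums : List Int) (hn : 2 ≤ nums.length) :
    maxIncreasingSubarrays_alt nums =
      (((List.range' 1 (nums.length - 1)).map (termB nums)).foldl max 0 : Nat) := by
  obtain ⟨x, t, rfl⟩ : ∃ x t, nums = x :: t := by
    cases nums with
    | nil => simp at hn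
    | cons a b => exact ⟨a, b, rfl⟩
  unfold maxIncreasingSubarrays_alt
  rw [if_neg (by simp only [List.length_cons] at hn ⊢; omega)]
  show altGo x t 0 1 0 = _
  have h0 : altGo x t 0 1 0
      = altGo ((x :: t).getD 0 0) (List.drop 1 (x :: t)) ((pN (x :: t) 0 : Nat) : Int) ((eN (x :: t) 0 : Nat) : Int) 0 := by
    simp [pN, eN]
  rw [h0, altGo_inv (x :: t) ((x :: t).length - 1) 0 0 (by simp only [List.length_cons]; omega)]
  rw [← foldl_max_cast, List.map_map]
  rfl

-- ---- the combinatorial core: the two maxima agree ----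
lemma dir1 (nums : List Int) (j : Nat) (hj : 1 ≤ j) (hjn : j < nums.length) :
    termB nums j ≤ ((List.range' 0 (nums.length - 1)).map (termA nums)).foldl max 1 := by
  have hbase : 1 ≤ ((List.range' 0 (nums.length - 1)).map (termA nums)).foldl max 1 :=
    le_foldl_max_base _ _
  have hterm : ∀ k, k < nums.length - 1 →
      termA nums k ≤ ((List.range' 0 (nums.length - 1)).map (termA nums)).foldl max 1 := by
    intro k hk
    exact le_foldl_max_mem _ _ (List.mem_map_of_mem (List.mem_range'_1.mpr ⟨by omega, by omega⟩))
  unfold termB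
  apply max_le
  · by_cases hz : eN nums j / 2 = 0
    · omega
    · have hm1 : 1 ≤ eN nums j / 2 := by omega
      have hme : eN nums j / 2 < eN nums j := by omega
      have hmj : eN nums j / 2 ≤ j := by have := e_le nums j; omega
      have hEk : eN nums (j - eN nums j / 2) = eN nums j - eN nums j / 2 :=
        run_e nums (eN nums j / 2) j hme
      have hs : eN nums j / 2 ≤ sN nums (j - eN nums j / 2 + 1) := by
        have hch : ∀ q, q < eN nums j / 2 - 1 →
            nums.getD (j - eN nums j / 2 + 1 + q) 0 < nums.getD (j - eN nums j / 2 + 1 + q + 1) 0 := by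
          intro q hq
          have hri := run_incr nums (eN nums j / 2 - q - 2) j (by omega)
          rw [show j - eN nums j / 2 + 1 + q = j - (eN nums j / 2 - q - 2) - 1 from by omega]
          rw [show j - (eN nums j / 2 - q - 2) - 1 + 1 = j - (eN nums j / 2 - q - 2) from by omega]
          exact hri
        have := s_ge nums (eN nums j / 2 - 1) (j - eN nums j / 2 + 1) (by omega) hch
        omega
      have : eN nums j / 2 ≤ termA nums (j - eN nums j / 2) := by
        unfold termA
        exact le_min (by omega) hs
      exact le_trans this (hterm _ (by omega))
  · rcases p_char nums j with ⟨hp0, _⟩ | ⟨h1, h2, h3⟩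
    · rw [hp0]
      simp only [Nat.zero_min]
      exact Nat.zero_le _
    · have hep := e_pos nums j
      have hs : eN nums j ≤ sN nums (j - eN nums j + 1) := by
        have hch : ∀ q, q < eN nums j - 1 →
            nums.getD (j - eN nums j + 1 + q) 0 < nums.getD (j - eN nums j + 1 + q + 1) 0 := by
          intro q hq
          have hri := run_incr nums (eN nums j - q - 2) j (by omega)
          rw [show j - eN nums j + 1 + q = j - (eN nums j - q - 2) - 1 from by omega]
          rw [show j - (eN nums j - q - 2) - 1 + 1 = j - (eN nums j - q - 2) from by omega]
          exact hri
        have := s_ge nums (eN nums j - 1) (j - eN nums j + 1) (by omega) hch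
        omega
      have hle : min (pN nums j) (eN nums j) ≤ termA nums (j - eN nums j) := by
        unfold termA
        apply le_min
        · rw [h3] at *
          exact min_le_left _ _
        · exact le_trans (min_le_right _ _) hs
      exact le_trans hle (hterm _ (by omega))

lemma dir2 (nums : List Int) (k : Nat) (hk : k < nums.length - 1) :
    termA nums k ≤ ((List.range' 1 (nums.length - 1)).map (termB nums)).foldl max 0 := by
  have hterm : ∀ j, 1 ≤ j → j < nums.length →
      termB nums j ≤ ((List.range' 1 (nums.length - 1)).map (termB nums)).foldl max 0 := by
    intro j h1 h2
    exact le_foldl_max_mem _ _ (List.mem_map_of_mem (List.mem_range'_1.mpr ⟨h1, by omega⟩))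
  have hS1 : 1 ≤ sN nums (k+1) := s_pos nums (k+1)
  have hSle : sN nums (k+1) ≤ nums.length - (k+1) := s_le nums nums.length (k+1) (by omega) (by omega)
  have hj1 : 1 ≤ k + sN nums (k+1) := by omega
  have hjn : k + sN nums (k+1) < nums.length := by omega
  have hchain : ∀ q, q < sN nums (k+1) - 1 →
      nums.getD (k+1+q) 0 < nums.getD (k+1+q+1) 0 := by
    intro q hq
    exact (s_steps nums q (k+1) (by omega)).1
  by_cases hc : nums.getD k 0 < nums.getD (k+1) 0
  · have hej : eN nums (k + sN nums (k+1)) = eN nums k + sN nums (k+1) := by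
      apply e_chain
      intro q hq
      cases q with
      | zero => simpa using hc
      | succ q' =>
        have h := hchain q' (by omega)
        have e1 : k + (q' + 1) = k + 1 + q' := by omega
        rw [e1]
        exact h
    have hv : termA nums k ≤ eN nums (k + sN nums (k+1)) / 2 := by
      unfold termA
      omega
    refine le_trans (le_trans hv (le_max_left _ _)) (hterm _ hj1 hjn)
  · have he1 : eN nums (k+1) = 1 := by rw [eN_succ, if_neg hc]
    have hej : eN nums (k + sN nums (k+1)) = sN nums (k+1) := by
      have h := e_chain nums (sN nums (k+1) - 1) (k+1) hchain
      rw [show k + 1 + (sN nums (k+1) - 1) = k + sN nums (k+1) from by omega] at h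
      rw [h, he1]
      omega
    have hpj : pN nums (k + sN nums (k+1)) = eN nums k := by
      rcases p_char nums (k + sN nums (k+1)) with ⟨_, h2⟩ | ⟨h1, h2, h3⟩
      · exact absurd h2 (by omega)
      · rw [h3, hej, show k + sN nums (k+1) - sN nums (k+1) = k from by omega]
    have hv : termA nums k ≤ termB nums (k + sN nums (k+1)) := by
      unfold termB termA
      rw [hpj, hej]
      exact le_max_of_le_right le_rfl
    exact le_trans hv (hterm _ hj1 hjn)

lemma base_le (nums : List Int) (hn : 2 ≤ nums.length) :
    1 ≤ ((List.range' 1 (nums.length - 1)).map (termB nums)).foldl max 0 := by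
  have h1 : 1 ≤ termB nums 1 := by
    unfold termB
    by_cases hc : nums.getD 0 0 < nums.getD 1 0
    · have he : eN nums 1 = 2 := by
        rw [eN_succ, if_pos hc]
        simp [eN]
      apply le_max_of_le_left
      omega
    · have he : eN nums 1 = 1 := by rw [eN_succ, if_neg hc]
      have hp : pN nums 1 = 1 := by
        rw [pN_succ, if_neg hc]
        simp [eN]
      apply le_max_of_le_right
      rw [he, hp]
      simp
  exact le_trans h1 (le_foldl_max_mem _ _
      (List.mem_map_of_mem (List.mem_range'_1.mpr ⟨le_refl 1, by omega⟩)))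

lemma refEq (nums : List Int) (hn : 2 ≤ nums.length) :
    ((List.range' 0 (nums.length - 1)).map (termA nums)).foldl max 1 =
    ((List.range' 1 (nums.length - 1)).map (termB nums)).foldl max 0 := by
  apply le_antisymm
  · apply foldl_max_le _ _ (base_le nums hn)
    intro x hx
    obtain ⟨k, hk, rfl⟩ := List.mem_map.mp hx
    have hk' := List.mem_range'_1.mp hk
    exact dir2 nums k (by omega)
  · apply foldl_max_le _ _ (by omega)
    intro x hx
    obtain ⟨j, hj, rfl⟩ := List.mem_map.mp hx
    have hj' := List.mem_range'_1.mp hj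
    exact dir1 nums j (by omega) (by omega)

-- ===== VERDICT (by name: the statement is the Claim_ definition above) =====
theorem maxIncreasingSubarrays_spec : Claim_equal_maxIncreasingSubarrays := by
  intro nums _
  unfold Spec_maxIncreasingSubarrays
  by_cases hn : nums.length ≤ 1
  · unfold maxIncreasingSubarrays maxIncreasingSubarrays_alt
    simp [hn]
  · rw [portA_eq nums (by omega), portB_eq nums (by omega), refEq nums (by omega)]
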